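-- pv_equiv track=rewrite | github.com/Shawvin/Leetcode | 2516-Medium.py | takeCharacters2
-- ===== SOURCE A (Python) =====
-- def takeCharacters2(s,k):
--     if k==0:
--         return 0
--     char_dict={}
--     for char in s:
--         char_dict[char]=char_dict.get(char,0)+1
--     char_a=char_dict.get('a',0)-k
--     char_b=char_dict.get('b',0)-k
--     char_c=char_dict.get('c',0)-k
--     if char_a<0 or char_b<0 or char_c<0:
--         return -1
--     c_dict={'a':0, 'b':0, 'c':0}
--     left=-1
--     max_len=0
--     idx=0
--     for c in s:
--         c_dict[c]+=1
--         idx+=1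
--         while c_dict['a']>char_a or c_dict['b']>char_b or c_dict['c']>char_c:
--             left+=1
--             c_dict[s[left]]-=1
--             idx-=1
--         max_len=max(max_len, idx)
--     return len(s)-max_len
-- ===== SOURCE B (Python) =====
-- def takeCharacters2(s, k):
--     # Minimise the chars TAKEN from the two ends instead of maximising the kept middle window.
--     ta = sum(1 for ch in s if ch == 'a')
--     tb = sum(1 for ch in s if ch == 'b')
--     tc = sum(1 for ch in s if ch == 'c')
--     if ta < k or tb < k or tc < k:
--         return -1
--     n = len(s)
--     # taken region = prefix s[:p] + suffix s[j:]; (ta, tb, tc) are its counts (initially everything)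
--     j = 0
--     best = n
--     for p in range(n + 1):
--         if p > 0:
--             c = s[p - 1]
--             if j < p:
--                 j = p  # the char moves from the suffix to the prefix; counts unchanged
--             else:
--                 if c == 'a':
--                     ta += 1
--                 elif c == 'b':
--                     tb += 1
--                 elif c == 'c':
--                     tc += 1
--         while j < n:  # give back s[j] from the suffix while still feasible
--             c = s[j]
--             if c == 'a':
--                 if ta - 1 < k:
--                     break
--                 ta -= 1
--             elif c == 'b':
--                 if tb - 1 < k:
--                     break
--                 tb -= 1
--             elif c == 'c':
--                 if tc - 1 < k:
--                     break
--                 tc -= 1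
--             j += 1
--         best = min(best, p + n - j)
--     return best
-- ===== Notes on version B (the rewrite author's own statement) =====
-- stated objective: alternative
-- what changed: B replaces A's dict-based counting and kept-middle-window maximisation by a prefix+suffix two-pointer over the TAKEN region: it starts with the whole string taken as suffix, grows the prefix one char at a time while giving the suffix back as long as at least k of each letter remain taken, and minimises prefix+suffix length (three integer counters, no dicts). (Pre_ excludes only inputs where A raises KeyError: a char outside 'abc' with k nonzero and all three counts >= k; B returns the natural answer there.)
import Mathlib
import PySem

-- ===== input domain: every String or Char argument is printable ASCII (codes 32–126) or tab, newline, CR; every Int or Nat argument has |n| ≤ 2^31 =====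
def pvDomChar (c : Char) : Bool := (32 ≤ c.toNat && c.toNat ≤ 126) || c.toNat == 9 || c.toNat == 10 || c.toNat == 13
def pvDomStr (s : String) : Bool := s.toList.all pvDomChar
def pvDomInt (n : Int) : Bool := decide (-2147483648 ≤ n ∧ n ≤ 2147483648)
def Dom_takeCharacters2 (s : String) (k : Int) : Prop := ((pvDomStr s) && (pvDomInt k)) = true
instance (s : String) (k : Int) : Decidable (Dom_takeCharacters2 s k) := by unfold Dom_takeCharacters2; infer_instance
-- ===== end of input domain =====

-- B re-implements the kept-window maximisation as a taken-from-the-ends minimisation (prefix+suffix two-pointer); objective: alternative decomposition, no dicts.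

-- ===== PORT A =====
-- c_dict has the three fixed keys 'a','b','c'; ported as a triple. Exact for chars in "abc"
-- (on other chars Python raises KeyError; Pre_ excludes those inputs from the claim).
def cdGet (d : Int × Int × Int) (ch : Char) : Int :=
  if ch = 'a' then d.1 else if ch = 'b' then d.2.1 else if ch = 'c' then d.2.2 else 0

def cdAdd (d : Int × Int × Int) (ch : Char) (v : Int) : Int × Int × Int :=
  if ch = 'a' then (d.1 + v, d.2.1, d.2.2)
  else if ch = 'b' then (d.1, d.2.1 + v, d.2.2)
  else if ch = 'c' then (d.1, d.2.1, d.2.2 + v)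
  else d

-- the inner `while` of A; fuel only makes the recursion total (the loop exits before fuel runs out under Pre_)
def whileA (l : List Char) (capa capb capc : Int) :
    Nat → (Int × Int × Int) → Int → Int → (Int × Int × Int) × Int × Int
  | 0, cd, left, idx => (cd, left, idx)
  | fuel + 1, cd, left, idx =>
    if cdGet cd 'a' > capa ∨ cdGet cd 'b' > capb ∨ cdGet cd 'c' > capc then
      match PySem.List.pyGet? l (left + 1) with
      | some ch => whileA l capa capb capc fuel (cdAdd cd ch (-1)) (left + 1) (idx - 1)
      | none => (cd, left + 1, idx)  -- Python raises IndexError here; unreachable under Pre_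
    else (cd, left, idx)

def stepA (l : List Char) (capa capb capc : Int)
    (st : (Int × Int × Int) × Int × Int × Int) (c : Char) : (Int × Int × Int) × Int × Int × Int :=
  let cd := cdAdd st.1 c 1
  let idx := st.2.2.1 + 1
  let w := whileA l capa capb capc l.length cd st.2.1 idx
  (w.1, w.2.1, w.2.2, max st.2.2.2 w.2.2)

def takeCharacters2 (s : String) (k : Int) : Int :=
  if k = 0 then 0
  else
    let l := s.toList
    let char_dict := l.foldl (fun d ch => d.insert ch (d.getD ch 0 + 1)) PySem.Dict.empty
    let char_a := char_dict.getD 'a' 0 - k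
    let char_b := char_dict.getD 'b' 0 - k
    let char_c := char_dict.getD 'c' 0 - k
    if char_a < 0 ∨ char_b < 0 ∨ char_c < 0 then -1
    else
      let st := l.foldl (stepA l char_a char_b char_c) ((0, 0, 0), -1, 0, 0)
      (l.length : Int) - st.2.2.2

-- ===== PORT B =====
-- the inner `while` of B; fuel only makes the recursion total
def whileB (l : List Char) (k : Int) :
    Nat → Int → (Int × Int × Int) → Int × (Int × Int × Int)
  | 0, j, t => (j, t)
  | fuel + 1, j, t =>
    if j < (l.length : Int) then
      match PySem.List.pyGet? l j with
      | some c =>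
        if c = 'a' then
          if t.1 - 1 < k then (j, t) else whileB l k fuel (j + 1) (t.1 - 1, t.2.1, t.2.2)
        else if c = 'b' then
          if t.2.1 - 1 < k then (j, t) else whileB l k fuel (j + 1) (t.1, t.2.1 - 1, t.2.2)
        else if c = 'c' then
          if t.2.2 - 1 < k then (j, t) else whileB l k fuel (j + 1) (t.1, t.2.1, t.2.2 - 1)
        else whileB l k fuel (j + 1) t
      | none => (j, t)  -- unreachable: 0 ≤ j < length
    else (j, t)

def stepB (l : List Char) (k : Int)
    (st : Int × (Int × Int × Int) × Int) (p : Nat) : Int × (Int × Int × Int) × Int :=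
  let jt :=
    if (p : Int) > 0 then
      match PySem.List.pyGet? l ((p : Int) - 1) with
      | some c =>
        if st.1 < (p : Int) then ((p : Int), st.2.1)
        else
          let t := st.2.1
          if c = 'a' then (st.1, (t.1 + 1, t.2.1, t.2.2))
          else if c = 'b' then (st.1, (t.1, t.2.1 + 1, t.2.2))
          else if c = 'c' then (st.1, (t.1, t.2.1, t.2.2 + 1))
          else (st.1, t)
      | none => (st.1, st.2.1)  -- unreachable: 1 ≤ p ≤ length
    else (st.1, st.2.1)
  let w := whileB l k l.length jt.1 jt.2
  (w.1, w.2, min st.2.2 ((p : Int) + (l.length : Int) - w.1))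

def takeCharacters2_alt (s : String) (k : Int) : Int :=
  let l := s.toList
  let ta := (l.map (fun ch => if ch == 'a' then (1 : Int) else 0)).sum
  let tb := (l.map (fun ch => if ch == 'b' then (1 : Int) else 0)).sum
  let tc := (l.map (fun ch => if ch == 'c' then (1 : Int) else 0)).sum
  if ta < k ∨ tb < k ∨ tc < k then -1
  else
    let st := (List.range (l.length + 1)).foldl (stepB l k) (0, (ta, tb, tc), (l.length : Int))
    st.2.2

-- ===== PRECONDITION & SPEC =====
-- Pre_ excludes exactly the inputs on which A raises KeyError: k ≠ 0, every one of 'a','b','c'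
-- occurs at least k times, and s contains a character outside "abc" (B returns the answer there).
def Pre_takeCharacters2 (s : String) (k : Int) : Prop :=
  k = 0 ∨ ((s.toList.count 'a' : Int) < k ∨ (s.toList.count 'b' : Int) < k ∨ (s.toList.count 'c' : Int) < k)
    ∨ (s.toList.all (fun c => c == 'a' || c == 'b' || c == 'c') = true)
instance (s : String) (k : Int) : Decidable (Pre_takeCharacters2 s k) := by unfold Pre_takeCharacters2; infer_instance

def pvWitness_takeCharacters2 : String × Int := ("aabcacb", 2)

def Spec_takeCharacters2 (s : String) (k : Int) (out : Int) : Prop := out = takeCharacters2_alt s k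
instance (s : String) (k : Int) (out : Int) : Decidable (Spec_takeCharacters2 s k out) := by unfold Spec_takeCharacters2; infer_instance

-- ===== CLAIM (what is proved, stated in full; the proofs are below) =====
def Claim_equal_takeCharacters2 : Prop := ∀ (s : String) (k : Int), Dom_takeCharacters2 s k → Pre_takeCharacters2 s k → Spec_takeCharacters2 s k (takeCharacters2 s k)
-- ===== LEMMAS AND PROOFS =====
-- ===== core combinatorial layer =====
def cntc (l : List Char) (x : Char) (i : Nat) : Int := ((l.take i).count x : Int)

def okb (l : List Char) (k : Int) (p q : Nat) : Bool :=
  decide (cntc l 'a' q - cntc l 'a' p ≤ (l.count 'a' : Int) - k) &&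
  decide (cntc l 'b' q - cntc l 'b' p ≤ (l.count 'b' : Int) - k) &&
  decide (cntc l 'c' q - cntc l 'c' p ≤ (l.count 'c' : Int) - k)

def Lm (l : List Char) (k : Int) (i : Nat) : Nat :=
  Nat.find (⟨i + 1, Or.inr (Nat.lt_succ_self i)⟩ : ∃ p, okb l k p i = true ∨ i < p)

def Rm (l : List Char) (k : Int) (p : Nat) : Nat :=
  Nat.findGreatest (fun q => okb l k p q = true) l.length

def feas (l : List Char) (k : Int) : Prop :=
  k ≤ (l.count 'a' : Int) ∧ k ≤ (l.count 'b' : Int) ∧ k ≤ (l.count 'c' : Int)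

theorem cntc_mono (l : List Char) (x : Char) {i j : Nat} (h : i ≤ j) : cntc l x i ≤ cntc l x j := by
  unfold cntc
  exact_mod_cast List.Sublist.count_le x (List.take_sublist_take_left h)

theorem cntc_le (l : List Char) (x : Char) (i : Nat) : cntc l x i ≤ (l.count x : Int) := by
  unfold cntc
  exact_mod_cast List.Sublist.count_le x (List.take_sublist i l)

theorem cntc_zero (l : List Char) (x : Char) : cntc l x 0 = 0 := by simp [cntc]

theorem cntc_succ (l : List Char) (x : Char) {i : Nat} (h : i < l.length) :
    cntc l x (i + 1) = cntc l x i + (if l[i] = x then 1 else 0) := by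
  unfold cntc
  rw [List.take_succ_eq_append_getElem h, List.count_append]
  have h1 : List.count x [l[i]] = if l[i] = x then 1 else 0 := by
    simp [List.count_singleton, beq_iff_eq]
  rw [h1]
  split_ifs <;> push_cast <;> ring

theorem okb_mono_left (l : List Char) (k : Int) {p p' q : Nat} (h : p ≤ p')
    (hok : okb l k p q = true) : okb l k p' q = true := by
  have ha := cntc_mono l 'a' h
  have hb := cntc_mono l 'b' h
  have hc := cntc_mono l 'c' h
  simp [okb] at hok ⊢
  omega

theorem okb_mono_right (l : List Char) (k : Int) {p q q' : Nat} (h : q' ≤ q)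
    (hok : okb l k p q = true) : okb l k p q' = true := by
  have ha := cntc_mono l 'a' h
  have hb := cntc_mono l 'b' h
  have hc := cntc_mono l 'c' h
  simp [okb] at hok ⊢
  omega

theorem okb_refl (l : List Char) (k : Int) (hf : feas l k) (q : Nat) : okb l k q q = true := by
  obtain ⟨ha, hb, hc⟩ := hf
  simp [okb]
  omega

theorem Lm_le (l : List Char) (k : Int) (hf : feas l k) (i : Nat) : Lm l k i ≤ i :=
  Nat.find_le (Or.inl (okb_refl l k hf i))

theorem okb_Lm (l : List Char) (k : Int) (hf : feas l k) (i : Nat) :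
    okb l k (Lm l k i) i = true := by
  have h := Nat.find_spec (⟨i + 1, Or.inr (Nat.lt_succ_self i)⟩ : ∃ p, okb l k p i = true ∨ i < p)
  have hle := Lm_le l k hf i
  unfold Lm at *
  rcases h with h | h
  · exact h
  · omega

theorem Lm_iff (l : List Char) (k : Int) (hf : feas l k) (i p : Nat) :
    okb l k p i = true ↔ Lm l k i ≤ p := by
  constructor
  · intro h
    exact Nat.find_le (Or.inl h)
  · intro h
    exact okb_mono_left l k h (okb_Lm l k hf i)

theorem Lm_mono (l : List Char) (k : Int) (hf : feas l k) (i : Nat) :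
    Lm l k i ≤ Lm l k (i + 1) := by
  rw [← Lm_iff l k hf i]
  exact okb_mono_right l k (Nat.le_succ i) (okb_Lm l k hf (i + 1))

theorem Rm_le (l : List Char) (k : Int) (p : Nat) : Rm l k p ≤ l.length :=
  Nat.findGreatest_le l.length

theorem le_Rm (l : List Char) (k : Int) (hf : feas l k) {p : Nat} (hp : p ≤ l.length) :
    p ≤ Rm l k p :=
  Nat.le_findGreatest hp (okb_refl l k hf p)

theorem okb_Rm (l : List Char) (k : Int) (hf : feas l k) {p : Nat} (hp : p ≤ l.length) :
    okb l k p (Rm l k p) = true := by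
  unfold Rm
  exact Nat.findGreatest_spec (P := fun q => okb l k p q = true) hp (okb_refl l k hf p)

theorem Rm_iff (l : List Char) (k : Int) (hf : feas l k) {p q : Nat} (hp : p ≤ l.length)
    (hq : q ≤ l.length) : okb l k p q = true ↔ q ≤ Rm l k p := by
  constructor
  · intro h
    exact Nat.le_findGreatest (P := fun q => okb l k p q = true) hq h
  · intro h
    exact okb_mono_right l k h (okb_Rm l k hf hp)

-- window / taken-count triples
def wcd (l : List Char) (p i : Nat) : Int × Int × Int :=
  (cntc l 'a' i - cntc l 'a' p, cntc l 'b' i - cntc l 'b' p, cntc l 'c' i - cntc l 'c' p)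

def tkn (l : List Char) (p j : Nat) : Int × Int × Int :=
  ((l.count 'a' : Int) - (cntc l 'a' j - cntc l 'a' p),
   (l.count 'b' : Int) - (cntc l 'b' j - cntc l 'b' p),
   (l.count 'c' : Int) - (cntc l 'c' j - cntc l 'c' p))

theorem wcd_cond (l : List Char) (k : Int) (p i : Nat) :
    ((cdGet (wcd l p i) 'a' > (l.count 'a' : Int) - k ∨
      cdGet (wcd l p i) 'b' > (l.count 'b' : Int) - k ∨
      cdGet (wcd l p i) 'c' > (l.count 'c' : Int) - k)) ↔ ¬ (okb l k p i = true) := by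
  simp [cdGet, wcd, okb]
  omega

theorem cdAdd_wcd_left (l : List Char) (p i : Nat) (h : p < l.length)
    (habc : l[p] = 'a' ∨ l[p] = 'b' ∨ l[p] = 'c') :
    cdAdd (wcd l p i) l[p] (-1) = wcd l (p + 1) i := by
  have ha := cntc_succ l 'a' h
  have hb := cntc_succ l 'b' h
  have hc := cntc_succ l 'c' h
  rcases habc with h1 | h1 | h1 <;>
    simp [cdAdd, wcd, h1] at ha hb hc ⊢ <;>
    omega

theorem whileA_spec (l : List Char) (k : Int) (hf : feas l k)
    (habc : ∀ c ∈ l, c = 'a' ∨ c = 'b' ∨ c = 'c') (i : Nat) (hi : i ≤ l.length) :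
    ∀ (fuel p : Nat), p ≤ Lm l k i → i - p ≤ fuel →
      whileA l ((l.count 'a' : Int) - k) ((l.count 'b' : Int) - k) ((l.count 'c' : Int) - k)
          fuel (wcd l p i) ((p : Int) - 1) ((i : Int) - (p : Int))
        = (wcd l (Lm l k i) i, ((Lm l k i : Nat) : Int) - 1, (i : Int) - (Lm l k i : Nat)) := by
  intro fuel
  induction fuel with
  | zero =>
    intro p hp hfuel
    have hLi := Lm_le l k hf i
    have hpL : p = Lm l k i := by omega
    subst hpL
    simp [whileA]
  | succ fuel ih =>
    intro p hp hfuel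
    have hLi := Lm_le l k hf i
    by_cases hok : okb l k p i = true
    · have hpL : p = Lm l k i := le_antisymm hp ((Lm_iff l k hf i p).mp hok)
      have hnc : ¬ (cdGet (wcd l p i) 'a' > (l.count 'a' : Int) - k ∨
          cdGet (wcd l p i) 'b' > (l.count 'b' : Int) - k ∨
          cdGet (wcd l p i) 'c' > (l.count 'c' : Int) - k) := by
        rw [wcd_cond]; simp [hok]
      rw [whileA, if_neg hnc, hpL]
    · have hpL : p < Lm l k i := lt_of_le_of_ne hp (fun h => hok (h ▸ okb_Lm l k hf i))
      have hplen : p < l.length := by omega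
      have hc : (cdGet (wcd l p i) 'a' > (l.count 'a' : Int) - k ∨
          cdGet (wcd l p i) 'b' > (l.count 'b' : Int) - k ∨
          cdGet (wcd l p i) 'c' > (l.count 'c' : Int) - k) := (wcd_cond l k p i).mpr hok
      rw [whileA, if_pos hc]
      have hidx : (p : Int) - 1 + 1 = ((p : Nat) : Int) := by omega
      rw [hidx]
      have hget : PySem.List.pyGet? l ((p : Nat) : Int) = some l[p] := by
        simp [PySem.List.pyGet?_natCast, hplen]
      simp only [hget]
      rw [cdAdd_wcd_left l p i hplen (habc l[p] (l.getElem_mem hplen))]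
      rw [show ((p : Nat) : Int) = ((p + 1 : Nat) : Int) - 1 from by push_cast; ring]
      rw [show ((i : Int) - (((p + 1 : Nat) : Int) - 1) - 1) = (i : Int) - ((p + 1 : Nat) : Int) from by
        push_cast; ring]
      exact ih (p + 1) (by omega) (by omega)

theorem tkn_zero (l : List Char) (p : Nat) : tkn l p p = ((l.count 'a' : Int), (l.count 'b' : Int), (l.count 'c' : Int)) := by
  simp [tkn]

theorem whileB_spec (l : List Char) (k : Int) (hf : feas l k) {q : Nat} (hq : q ≤ l.length) :
    ∀ (fuel j : Nat), q ≤ j → j ≤ Rm l k q → l.length - j ≤ fuel →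
      whileB l k fuel (j : Int) (tkn l q j) = (((Rm l k q : Nat) : Int), tkn l q (Rm l k q)) := by
  intro fuel
  induction fuel with
  | zero =>
    intro j hqj hjR hfuel
    have hR := Rm_le l k q
    have hj : j = Rm l k q := by omega
    subst hj
    simp [whileB]
  | succ fuel ih =>
    intro j hqj hjR hfuel
    have hR := Rm_le l k q
    by_cases hj : j < l.length
    · have hget : PySem.List.pyGet? l ((j : Nat) : Int) = some l[j] := by
        simp [hj]
      have hokj : okb l k q j = true := (Rm_iff l k hf hq (by omega)).mpr hjR
      have hbj : (↑j : Int) < (l.length : Int) := by omega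
      rw [whileB, if_pos hbj]
      simp only [hget]
      have hcoma := cntc_succ l 'a' hj
      have hcomb := cntc_succ l 'b' hj
      have hcomc := cntc_succ l 'c' hj
      -- whether the window can still grow
      by_cases hok1 : okb l k q (j + 1) = true
      · -- no break: give s[j] back, recurse
        have hjR1 : j + 1 ≤ Rm l k q := (Rm_iff l k hf hq (by omega)).mp hok1
        have hrec := ih (j + 1) (by omega) hjR1 (by omega)
        have hj1 : ((j : Nat) : Int) + 1 = ((j + 1 : Nat) : Int) := by push_cast; ring
        simp only [okb, Bool.and_eq_true, decide_eq_true_eq] at hok1 hokj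
        by_cases ha : l[j] = 'a'
        · rw [if_pos ha]
          rw [if_neg (by simp [tkn, ha] at hcoma ⊢; omega)]
          have ht : ((tkn l q j).1 - 1, (tkn l q j).2.1, (tkn l q j).2.2) = tkn l q (j + 1) := by
            simp [tkn, ha] at hcoma hcomb hcomc ⊢
            omega
          rw [ht, hj1, hrec]
        · rw [if_neg ha]
          by_cases hb : l[j] = 'b'
          · rw [if_pos hb]
            rw [if_neg (by simp [tkn, hb] at hcomb ⊢; omega)]
            have ht : ((tkn l q j).1, (tkn l q j).2.1 - 1, (tkn l q j).2.2) = tkn l q (j + 1) := by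
              simp [tkn, hb, ha] at hcoma hcomb hcomc ⊢
              omega
            rw [ht, hj1, hrec]
          · rw [if_neg hb]
            by_cases hc : l[j] = 'c'
            · rw [if_pos hc]
              rw [if_neg (by simp [tkn, hc] at hcomc ⊢; omega)]
              have ht : ((tkn l q j).1, (tkn l q j).2.1, (tkn l q j).2.2 - 1) = tkn l q (j + 1) := by
                simp [tkn, hc, ha, hb] at hcoma hcomb hcomc ⊢
                omega
              rw [ht, hj1, hrec]
            · rw [if_neg hc]
              have ht : tkn l q j = tkn l q (j + 1) := by
                simp [tkn, ha, hb, hc] at hcoma hcomb hcomc ⊢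
                omega
              rw [ht, hj1, hrec]
      · -- break: j is already maximal
        have hRj : Rm l k q = j := by
          have := (Rm_iff l k hf (p := q) (q := j + 1) hq (by omega)).not.mp (by simp [hok1])
          omega
        rw [hRj]
        simp only [okb, Bool.and_eq_true, decide_eq_true_eq, not_and_or] at hok1 hokj
        by_cases ha : l[j] = 'a'
        · rw [if_pos ha]
          rw [if_pos (by simp [ha] at hcoma hcomb hcomc; simp [tkn]; omega)]
        · rw [if_neg ha]
          by_cases hb : l[j] = 'b'
          · rw [if_pos hb]
            rw [if_pos (by simp [hb, ha] at hcoma hcomb hcomc; simp [tkn]; omega)]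
          · rw [if_neg hb]
            by_cases hc : l[j] = 'c'
            · rw [if_pos hc]
              rw [if_pos (by simp [hc, ha, hb] at hcoma hcomb hcomc; simp [tkn]; omega)]
            · -- a char outside abc never breaks, but then okb q (j+1) = okb q j : contradiction
              exfalso
              simp [ha, hb, hc] at hcoma hcomb hcomc
              omega
    · have hjl : j = l.length := by omega
      have hRj : Rm l k q = j := by omega
      rw [whileB, if_neg (by omega), hRj]

theorem cdAdd_wcd_right (l : List Char) (p i : Nat) (h : i < l.length)
    (habc : l[i] = 'a' ∨ l[i] = 'b' ∨ l[i] = 'c') :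
    cdAdd (wcd l p i) l[i] 1 = wcd l p (i + 1) := by
  have ha := cntc_succ l 'a' h
  have hb := cntc_succ l 'b' h
  have hc := cntc_succ l 'c' h
  rcases habc with h1 | h1 | h1 <;>
    simp [cdAdd, wcd, h1] at ha hb hc ⊢ <;>
    omega

def MA (l : List Char) (k : Int) (i : Nat) : Int :=
  (List.range i).foldl (fun m t => max m (((t + 1 : Nat) : Int) - ((Lm l k (t + 1) : Nat) : Int))) 0

def MB (l : List Char) (k : Int) (p : Nat) : Int :=
  (List.range (p + 1)).foldl (fun b u => min b (((u : Nat) : Int) + (l.length : Int) - ((Rm l k u : Nat) : Int))) (l.length : Int)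

theorem loopA_inv (l : List Char) (k : Int) (hf : feas l k)
    (habc : ∀ c ∈ l, c = 'a' ∨ c = 'b' ∨ c = 'c') :
    ∀ i, i ≤ l.length →
      (l.take i).foldl (stepA l ((l.count 'a' : Int) - k) ((l.count 'b' : Int) - k) ((l.count 'c' : Int) - k))
          ((0, 0, 0), -1, 0, 0)
        = (wcd l (Lm l k i) i, ((Lm l k i : Nat) : Int) - 1,
           (i : Int) - ((Lm l k i : Nat) : Int), MA l k i) := by
  intro i
  induction i with
  | zero =>
    intro _
    have hL0 : Lm l k 0 = 0 := Nat.le_zero.mp (Lm_le l k hf 0)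
    simp [hL0, wcd, cntc_zero, MA]
  | succ i ih =>
    intro hi1
    have hi : i < l.length := by omega
    rw [List.take_succ_eq_append_getElem hi, List.foldl_append, ih (by omega)]
    show stepA _ _ _ _ _ _ = _
    unfold stepA
    simp only
    rw [cdAdd_wcd_right l (Lm l k i) i hi (habc l[i] (l.getElem_mem hi))]
    have hLi := Lm_le l k hf i
    have hidx : (i : Int) - ((Lm l k i : Nat) : Int) + 1 = ((i + 1 : Nat) : Int) - ((Lm l k i : Nat) : Int) := by
      push_cast; ring
    rw [hidx]
    rw [whileA_spec l k hf habc (i + 1) (by omega) l.length (Lm l k i) (Lm_mono l k hf i) (by omega)]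
    have hMA : max (MA l k i) (((i + 1 : Nat) : Int) - ((Lm l k (i + 1) : Nat) : Int)) = MA l k (i + 1) := by
      unfold MA
      rw [List.range_succ, List.foldl_append]
      rfl
    rw [hMA]

theorem tkn_shift (l : List Char) (j0 : Int) (p j : Nat) (h : p < l.length) :
    (if l[p] = 'a' then (j0, ((tkn l p j).1 + 1, (tkn l p j).2.1, (tkn l p j).2.2))
     else if l[p] = 'b' then (j0, ((tkn l p j).1, (tkn l p j).2.1 + 1, (tkn l p j).2.2))
     else if l[p] = 'c' then (j0, ((tkn l p j).1, (tkn l p j).2.1, (tkn l p j).2.2 + 1))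
     else (j0, tkn l p j)) = (j0, tkn l (p + 1) j) := by
  have ha := cntc_succ l 'a' h
  have hb := cntc_succ l 'b' h
  have hc := cntc_succ l 'c' h
  by_cases h1 : l[p] = 'a'
  · simp [h1] at ha hb hc; simp [h1, tkn]; omega
  · by_cases h2 : l[p] = 'b'
    · simp [h2, h1] at ha hb hc; simp [h1, h2, tkn]; omega
    · by_cases h3 : l[p] = 'c'
      · simp [h3, h1, h2] at ha hb hc; simp [h1, h2, h3, tkn]; omega
      · simp [h1, h2, h3] at ha hb hc; simp [h1, h2, h3, tkn]; omega

theorem loopB_inv (l : List Char) (k : Int) (hf : feas l k) :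
    ∀ p, p ≤ l.length →
      (List.range (p + 1)).foldl (stepB l k)
          (0, ((l.count 'a' : Int), (l.count 'b' : Int), (l.count 'c' : Int)), (l.length : Int))
        = (((Rm l k p : Nat) : Int), tkn l p (Rm l k p), MB l k p) := by
  intro p
  induction p with
  | zero =>
    intro _
    show stepB l k _ 0 = _
    unfold stepB
    simp only [Nat.cast_zero, gt_iff_lt, lt_irrefl, if_false, Nat.cast_ofNat]
    rw [show ((l.count 'a' : Int), (l.count 'b' : Int), (l.count 'c' : Int)) = tkn l 0 0 from (tkn_zero l 0).symm]
    have hw := whileB_spec l k hf (Nat.zero_le l.length) l.length 0 (le_refl 0) (le_Rm l k hf (Nat.zero_le _)) (by omega)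
    push_cast at hw
    rw [hw]
    unfold MB
    simp
  | succ p ih =>
    intro hp1
    have hp : p < l.length := by omega
    rw [List.range_succ, List.foldl_append, ih (by omega)]
    show stepB _ _ _ _ = _
    unfold stepB
    simp only
    have hpos : ((p + 1 : Nat) : Int) > 0 := by push_cast; omega
    rw [if_pos hpos]
    have hidx : ((p + 1 : Nat) : Int) - 1 = ((p : Nat) : Int) := by push_cast; ring
    rw [hidx]
    have hget : PySem.List.pyGet? l ((p : Nat) : Int) = some l[p] := by simp [hp]
    simp only [hget]
    have hRp := le_Rm l k hf (le_of_lt hp)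
    have hRle := Rm_le l k p
    have hmono : Rm l k p ≤ Rm l k (p + 1) := by
      rw [← Rm_iff l k hf hp1 hRle]
      exact okb_mono_left l k (Nat.le_succ p) (okb_Rm l k hf (le_of_lt hp))
    by_cases hcase : Rm l k p < p + 1
    · -- the suffix pointer is overtaken: j := p+1, counts unchanged
      have hRp' : Rm l k p = p := by omega
      rw [if_pos (by rw [hRp']; push_cast; omega)]
      have ht : tkn l p (Rm l k p) = tkn l (p + 1) (p + 1) := by
        rw [hRp', tkn_zero, tkn_zero]
      rw [ht]
      rw [whileB_spec l k hf hp1 l.length (p + 1) (le_refl _) (le_Rm l k hf hp1) (by omega)]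
      have hMB : min (MB l k p) (((p + 1 : Nat) : Int) + (l.length : Int) - ((Rm l k (p + 1) : Nat) : Int)) = MB l k (p + 1) := by
        conv_rhs => unfold MB
        conv_rhs => rw [List.range_succ, List.foldl_append]
        rfl
      rw [hMB]
    · -- the taken prefix gains s[p]
      rw [if_neg (by push_cast; omega)]
      rw [tkn_shift l (((Rm l k p : Nat) : Int)) p (Rm l k p) hp]
      have hok : okb l k (p + 1) (Rm l k p) = true :=
        okb_mono_left l k (Nat.le_succ p) (okb_Rm l k hf (le_of_lt hp))
      have hjR : Rm l k p ≤ Rm l k (p + 1) := hmono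
      rw [whileB_spec l k hf hp1 l.length (Rm l k p) (by omega) ((Rm_iff l k hf hp1 hRle).mp hok) (by omega)]
      have hMB : min (MB l k p) (((p + 1 : Nat) : Int) + (l.length : Int) - ((Rm l k (p + 1) : Nat) : Int)) = MB l k (p + 1) := by
        conv_rhs => unfold MB
        conv_rhs => rw [List.range_succ, List.foldl_append]
        rfl
      rw [hMB]

theorem MA_map (l : List Char) (k : Int) (i : Nat) :
    MA l k i = ((List.range i).map (fun t => ((t + 1 : Nat) : Int) - ((Lm l k (t + 1) : Nat) : Int))).foldl max 0 := by
  rw [MA, List.foldl_map]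

theorem MB_map (l : List Char) (k : Int) (p : Nat) :
    MB l k p = ((List.range (p + 1)).map (fun u => ((u : Nat) : Int) + (l.length : Int) - ((Rm l k u : Nat) : Int))).foldl min (l.length : Int) := by
  rw [MB, List.foldl_map]

theorem MA_nonneg (l : List Char) (k : Int) (i : Nat) : 0 ≤ MA l k i := by
  rw [MA_map]
  exact (PySem.List.le_foldl_max _ 0).1

theorem MB_eq (l : List Char) (k : Int) (hf : feas l k) :
    MB l k l.length = (l.length : Int) - MA l k l.length := by
  have h1 : MB l k l.length ≤ (l.length : Int) - MA l k l.length := by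
    rcases PySem.List.foldl_max_mem ((List.range l.length).map (fun t => ((t + 1 : Nat) : Int) - ((Lm l k (t + 1) : Nat) : Int))) 0 with hM | hM
    · rw [MA_map, hM]
      have := (PySem.List.foldl_min_le ((List.range (l.length + 1)).map (fun u => ((u : Nat) : Int) + (l.length : Int) - ((Rm l k u : Nat) : Int))) (l.length : Int)).1
      rw [MB_map]
      omega
    · rw [MA_map]
      obtain ⟨t, htmem, hft⟩ := List.mem_map.mp hM
      have ht : t < l.length := List.mem_range.mp htmem
      have hLle : Lm l k (t + 1) ≤ t + 1 := Lm_le l k hf (t + 1)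
      have hRge : t + 1 ≤ Rm l k (Lm l k (t + 1)) :=
        (Rm_iff l k hf (by omega) (by omega)).mp (okb_Lm l k hf (t + 1))
      have hmem2 : ((Lm l k (t + 1) : Nat) : Int) + (l.length : Int) - ((Rm l k (Lm l k (t + 1)) : Nat) : Int)
          ∈ ((List.range (l.length + 1)).map (fun u => ((u : Nat) : Int) + (l.length : Int) - ((Rm l k u : Nat) : Int))) :=
        List.mem_map.mpr ⟨Lm l k (t + 1), List.mem_range.mpr (by omega), rfl⟩
      have hle := (PySem.List.foldl_min_le _ (l.length : Int)).2 _ hmem2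
      rw [MB_map]
      omega
  have h2 : (l.length : Int) - MA l k l.length ≤ MB l k l.length := by
    have hMA0 := MA_nonneg l k l.length
    rcases PySem.List.foldl_min_mem ((List.range (l.length + 1)).map (fun u => ((u : Nat) : Int) + (l.length : Int) - ((Rm l k u : Nat) : Int))) (l.length : Int) with hm | hm
    · rw [MB_map, hm]
      omega
    · rw [MB_map]
      obtain ⟨u, humem, hfu⟩ := List.mem_map.mp hm
      have hu : u ≤ l.length := by have := List.mem_range.mp humem; omega
      have huR : u ≤ Rm l k u := le_Rm l k hf hu
      have hRu : Rm l k u ≤ l.length := Rm_le l k u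
      by_cases hequ : Rm l k u = u
      · rw [← hfu]
        omega
      · have hR1 : u + 1 ≤ Rm l k u := by omega
        have hLu : Lm l k (Rm l k u) ≤ u := (Lm_iff l k hf (Rm l k u) u).mp (okb_Rm l k hf hu)
        have hfmem : ((Rm l k u - 1 + 1 : Nat) : Int) - ((Lm l k (Rm l k u - 1 + 1) : Nat) : Int)
            ∈ ((List.range l.length).map (fun t => ((t + 1 : Nat) : Int) - ((Lm l k (t + 1) : Nat) : Int))) :=
          List.mem_map.mpr ⟨Rm l k u - 1, List.mem_range.mpr (by omega), rfl⟩
        have hle := (PySem.List.le_foldl_max ((List.range l.length).map (fun t => ((t + 1 : Nat) : Int) - ((Lm l k (t + 1) : Nat) : Int))) 0).2 _ hfmem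
        rw [MA_map] at *
        have he : Rm l k u - 1 + 1 = Rm l k u := by omega
        rw [he] at hfmem hle
        rw [← hfu]
        omega
  omega

theorem Lm_zero_of_k_nonpos (l : List Char) (k : Int) (hk : k ≤ 0) (i : Nat) : Lm l k i = 0 := by
  have : okb l k 0 i = true := by
    have ha := cntc_le l 'a' i
    have hb := cntc_le l 'b' i
    have hc := cntc_le l 'c' i
    simp [okb, cntc_zero]
    omega
  have h2 : Lm l k i ≤ 0 := Nat.find_le (h := ⟨i + 1, Or.inr (Nat.lt_succ_self i)⟩) (Or.inl this)
  omega

theorem MA_of_k_nonpos (l : List Char) (k : Int) (hk : k ≤ 0) : MA l k l.length = (l.length : Int) := by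
  have hL : ∀ t, ((t + 1 : Nat) : Int) - ((Lm l k (t + 1) : Nat) : Int) = ((t + 1 : Nat) : Int) := by
    intro t
    rw [Lm_zero_of_k_nonpos l k hk]
    simp
  unfold MA
  have : ∀ m : Nat, (List.range m).foldl (fun a t => max a (((t + 1 : Nat) : Int) - ((Lm l k (t + 1) : Nat) : Int))) 0 = (m : Nat) := by
    intro m
    induction m with
    | zero => simp
    | succ m ih =>
      rw [List.range_succ, List.foldl_append, ih]
      simp only [List.foldl, hL]
      push_cast
      omega
  exact this l.length

theorem counts_A (l : List Char) (x : Char) :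
    ((l.foldl (fun d ch => d.insert ch (d.getD ch 0 + 1)) PySem.Dict.empty).getD x 0 : Int) = (l.count x : Int) := by
  rw [PySem.Dict.getD_foldl_insert_add_one]
  simp

theorem counts_B (l : List Char) (x : Char) :
    (l.map (fun ch => if ch == x then (1 : Int) else 0)).sum = (l.count x : Int) := by
  rw [PySem.List.sum_map_ite_one_zero]
  simp [List.count]

theorem alt_of_feas (s : String) (k : Int) (hf : feas s.toList k) :
    takeCharacters2_alt s k = (s.toList.length : Int) - MA s.toList k s.toList.length := by
  unfold takeCharacters2_alt
  simp only [counts_B]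
  rw [if_neg (by obtain ⟨h1, h2, h3⟩ := hf; push Not; exact ⟨h1, h2, h3⟩)]
  rw [loopB_inv s.toList k hf s.toList.length (le_refl _)]
  exact MB_eq s.toList k hf

theorem main_equiv (s : String) (k : Int) (hpre : Pre_takeCharacters2 s k) :
    takeCharacters2 s k = takeCharacters2_alt s k := by
  by_cases hk : k = 0
  · -- A returns 0 immediately; B's answer is also 0 because nothing need be taken
    have hf : feas s.toList k := by
      refine ⟨?_, ?_, ?_⟩ <;> (rw [hk]; positivity)
    rw [alt_of_feas s k hf, MA_of_k_nonpos s.toList k (by omega)]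
    unfold takeCharacters2
    rw [if_pos hk]
    omega
  · by_cases hfe : feas s.toList k
    · -- the interesting branch: both loops run
      have habc : ∀ c ∈ s.toList, c = 'a' ∨ c = 'b' ∨ c = 'c' := by
        rcases hpre with h | h | h
        · exact absurd h hk
        · exact absurd hfe (by obtain ⟨h1, h2, h3⟩ := hfe; rcases h with h | h | h <;> omega)
        · intro c hc
          have := List.all_eq_true.mp h c hc
          simp only [Bool.or_eq_true, beq_iff_eq] at this
          tauto
      rw [alt_of_feas s k hfe]
      unfold takeCharacters2
      rw [if_neg hk]
      simp only [counts_A]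
      rw [if_neg (by obtain ⟨h1, h2, h3⟩ := hfe; push Not; refine ⟨by omega, by omega, by omega⟩)]
      have hA := loopA_inv s.toList k hfe habc s.toList.length (le_refl _)
      rw [List.take_length] at hA
      rw [hA]
    · -- infeasible: both return -1
      have hk' : ¬ feas s.toList k := hfe
      unfold takeCharacters2 takeCharacters2_alt
      rw [if_neg hk]
      simp only [counts_A, counts_B]
      rw [if_pos (by unfold feas at hk'; push Not at hk'; omega),
          if_pos (by unfold feas at hk'; push Not at hk'; omega)]

-- ===== VERDICT (by name: the statement is the Claim_ definition above) =====
theorem takeCharacters2_spec : Claim_equal_takeCharacters2 := by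
  intro s k _ hpre
  unfold Spec_takeCharacters2
  exact main_equiv s k hpre
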